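-- pv_equiv track=rewrite | github.com/norbasko/urpan-inpaint | src/urpan_inpaint/inpainting.py | _propainter_retry_chunk_sizes
-- ===== SOURCE A (Python) =====
-- def _propainter_retry_chunk_sizes(initial_chunk_size: int) -> list[int]:
--     size = max(1, int(initial_chunk_size))
--     sizes: list[int] = []
--     while size >= 1:
--         if size not in sizes:
--             sizes.append(size)
--         if size == 1:
--             break
--         size = max(1, size // 2)
--     return sizes
-- ===== SOURCE B (Python) =====
-- def _propainter_retry_chunk_sizes(initial_chunk_size: int) -> list[int]:
--     n = max(1, int(initial_chunk_size))
--     return [n >> k for k in range(n.bit_length())]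
-- ===== Notes on version B (the rewrite author's own statement) =====
-- stated objective: idiomatic
-- what changed: Replaced the while-loop with append-and-dedup by a closed-form comprehension: the term count comes from bit_length and each element is n >> k, so the loop, the mutation and the (dead) membership check disappear.
import Mathlib
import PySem

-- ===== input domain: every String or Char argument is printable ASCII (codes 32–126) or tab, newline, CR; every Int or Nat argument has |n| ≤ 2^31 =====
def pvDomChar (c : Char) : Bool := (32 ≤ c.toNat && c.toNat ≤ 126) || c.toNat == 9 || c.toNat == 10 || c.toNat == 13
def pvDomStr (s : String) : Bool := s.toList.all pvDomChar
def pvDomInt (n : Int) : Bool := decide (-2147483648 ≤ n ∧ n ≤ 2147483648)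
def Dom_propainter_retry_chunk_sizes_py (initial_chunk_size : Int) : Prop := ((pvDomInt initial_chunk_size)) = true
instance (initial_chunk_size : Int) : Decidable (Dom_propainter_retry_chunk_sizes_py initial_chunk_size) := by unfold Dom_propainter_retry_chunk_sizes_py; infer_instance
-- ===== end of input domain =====

-- B replaces A's halve-and-append while loop (with its dead dedup check) by a closed-form
-- comprehension over bit_length; objective: idiomatic. A is total on int input.

-- ===== PORT A =====
-- the `while size >= 1:` loop; state = (size, sizes), terminates because size strictly shrinks
def pvALoop (size : Int) (sizes : List Int) : List Int :=
  if 1 ≤ size then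
    let sizes' := if size ∈ sizes then sizes else sizes ++ [size]
    if size = 1 then sizes'
    else pvALoop (max 1 (PySem.Int.floordiv size 2)) sizes'
  else sizes
termination_by size.toNat
decreasing_by
  rename_i h1 h2
  have h3 : 2 ≤ size := by omega
  have := PySem.Int.floordiv_eq_ediv_of_pos (a := size) (b := 2) (by omega)
  omega

def propainter_retry_chunk_sizes_py (initial_chunk_size : Int) : List Int :=
  pvALoop (max 1 initial_chunk_size) []

-- ===== PORT B =====
-- Source B: n = max(1, int(initial_chunk_size)); return [n >> k for k in range(n.bit_length())]
def propainter_retry_chunk_sizes_py_alt (initial_chunk_size : Int) : List Int :=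
  let n := max 1 initial_chunk_size
  (List.range (PySem.Int.bitLength n)).map (fun k : Nat => n >>> k)

-- ===== PRECONDITION & SPEC =====
def Spec_propainter_retry_chunk_sizes_py (initial_chunk_size : Int) (out : List Int) : Prop := out = propainter_retry_chunk_sizes_py_alt initial_chunk_size
instance (initial_chunk_size : Int) (out : List Int) : Decidable (Spec_propainter_retry_chunk_sizes_py initial_chunk_size out) := by unfold Spec_propainter_retry_chunk_sizes_py; infer_instance

-- ===== CLAIM (what is proved, stated in full; the proofs are below) =====
def Claim_equal_propainter_retry_chunk_sizes_py : Prop := ∀ (initial_chunk_size : Int), Dom_propainter_retry_chunk_sizes_py initial_chunk_size → Spec_propainter_retry_chunk_sizes_py initial_chunk_size (propainter_retry_chunk_sizes_py initial_chunk_size)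

-- ===== LEMMAS AND PROOFS =====

-- B's sequence for a positive (Nat-valued) start
def pvSeq (m : Nat) : List Int :=
  (List.range (PySem.Int.bitLength (m : Int))).map (fun k : Nat => (m : Int) >>> k)

lemma pvSeq_one : pvSeq 1 = [1] := by decide

lemma pvSeq_step (m : Nat) (h : 2 ≤ m) : pvSeq m = (m : Int) :: pvSeq (m / 2) := by
  unfold pvSeq
  rw [PySem.Int.bitLength_natCast (by omega : 0 < m), List.range_succ_eq_map, List.map_cons,
    List.map_map]
  congr 1
  apply List.map_congr_left
  intro a _
  simp only [Function.comp_apply, Nat.succ_eq_add_one]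
  have h1 : ((m : Int)) >>> (a + 1) = ((m >>> (a + 1) : Nat) : Int) := by simp
  have h2 : ((m / 2 : Nat) : Int) >>> a = (((m / 2) >>> a : Nat) : Int) := by simp
  rw [h1, h2, Nat.shiftRight_succ_inside]

lemma pvALoop_eq (m : Nat) : 1 ≤ m → ∀ acc : List Int, (∀ x ∈ acc, (m : Int) < x) →
    pvALoop (m : Int) acc = acc ++ pvSeq m := by
  induction m using Nat.strong_induction_on with
  | _ m ih =>
    intro hm acc hacc
    rw [pvALoop]
    have hnotmem : ¬ ((m : Int) ∈ acc) := fun hmem => absurd (hacc _ hmem) (by omega)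
    by_cases h1 : m = 1
    · subst h1
      simp [pvSeq_one]
      simpa using hnotmem
    · have h2 : 2 ≤ m := by omega
      have hfd : PySem.Int.floordiv (m : Int) 2 = ((m / 2 : Nat) : Int) := by
        rw [PySem.Int.floordiv_eq_ediv_of_pos (by omega)]
        exact_mod_cast (Int.natCast_div m 2).symm
      have hhalf : 1 ≤ m / 2 := by omega
      have hlt : m / 2 < m := by omega
      have hmax : max 1 (PySem.Int.floordiv (m : Int) 2) = ((m / 2 : Nat) : Int) := by
        rw [hfd]; omega
      have hcond : (1 : Int) ≤ (m : Int) := by exact_mod_cast hm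
      simp only [hcond, if_true, hnotmem, if_false,
        show ((m : Int) = 1) = False by simp; omega, hmax]
      rw [ih (m / 2) hlt hhalf (acc ++ [(m : Int)])
        (by intro x hx
            rcases List.mem_append.mp hx with hx | hx
            · have := hacc _ hx; push_cast; omega
            · simp at hx; subst hx; exact_mod_cast hlt)]
      rw [pvSeq_step m h2, List.append_assoc]
      rfl

-- ===== VERDICT (by name: the statement is the Claim_ definition above) =====
theorem propainter_retry_chunk_sizes_py_spec : Claim_equal_propainter_retry_chunk_sizes_py := by
  intro n _
  unfold Spec_propainter_retry_chunk_sizes_py propainter_retry_chunk_sizes_py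
    propainter_retry_chunk_sizes_py_alt
  have h1 : (1 : Int) ≤ max 1 n := le_max_left 1 n
  have hcast : max 1 n = (((max 1 n).toNat : Nat) : Int) := by omega
  rw [hcast, pvALoop_eq ((max 1 n).toNat) (by omega) [] (by intro x hx; simp at hx)]
  simp [pvSeq]
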